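-- pv_equiv track=rewrite | github.com/YJCh0/Theorycraft | main/Beta/crawl_standalone.py | detect_upgrade_track
-- ===== SOURCE A (Python) =====
-- UPGRADE_TRACKS = {
--     'myth': {
--         'base': 707,
--         'max_upgrades': 8,
--         'levels': [707, 710, 714, 717, 720, 723, 727, 730]
--     },
--     'hero': {
--         'base': 694,
--         'max_upgrades': 8,
--         'levels': [694, 697, 701, 704, 707, 710, 714, 717]
--     },
--     'champion': {
--         'base': 681,
--         'max_upgrades': 8,
--         'levels': [681, 684, 688, 691, 694, 697, 701, 704]
--     },
--     'veteran': {
--         'base': 668,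
--         'max_upgrades': 8,
--         'levels': [668, 671, 675, 678, 681, 684, 688, 691]
--     },
--     'adventurer': {
--         'base': 655,
--         'max_upgrades': 8,
--         'levels': [655, 658, 661, 665, 668, 671, 675, 678]
--     },
--     'explorer': {
--         'base': 643,
--         'max_upgrades': 8,
--         'levels': [643, 646, 649, 652, 655, 658, 661, 665]
--     }
-- }
--
-- def detect_upgrade_track(item_level):
--     """Detect upgrade track and level from item level"""
--     for track_name, track_info in UPGRADE_TRACKS.items():
--         if item_level in track_info['levels']:
--             upgrade_level = track_info['levels'].index(item_level)
--             return (track_name.title(), upgrade_level, track_info['max_upgrades'])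
--
--     # Beyond max myth track
--     if item_level >= 730:
--         return ("Myth", 8, 8)
--
--     return None
-- ===== SOURCE B (Python) =====
-- UPGRADE_TRACKS = {
--     'myth': {
--         'base': 707,
--         'max_upgrades': 8,
--         'levels': [707, 710, 714, 717, 720, 723, 727, 730]
--     },
--     'hero': {
--         'base': 694,
--         'max_upgrades': 8,
--         'levels': [694, 697, 701, 704, 707, 710, 714, 717]
--     },
--     'champion': {
--         'base': 681,
--         'max_upgrades': 8,
--         'levels': [681, 684, 688, 691, 694, 697, 701, 704]
--     },
--     'veteran': {
--         'base': 668,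
--         'max_upgrades': 8,
--         'levels': [668, 671, 675, 678, 681, 684, 688, 691]
--     },
--     'adventurer': {
--         'base': 655,
--         'max_upgrades': 8,
--         'levels': [655, 658, 661, 665, 668, 671, 675, 678]
--     },
--     'explorer': {
--         'base': 643,
--         'max_upgrades': 8,
--         'levels': [643, 646, 649, 652, 655, 658, 661, 665]
--     }
-- }
--
-- # The six tracks' level lists are overlapping 8-entry windows of ONE global ladder of
-- # 28 distinct levels: each track starts 4 ladder positions above the previous one
-- # (explorer at 0, adventurer at 4, ..., myth at 20).  So a level's track and index are
-- # pure arithmetic on its ladder position p: the winning (earliest-declared = highest)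
-- # track starts at min(20, 4*(p//4)), and the index is p minus that start.
-- LADDER = sorted({lvl for info in UPGRADE_TRACKS.values() for lvl in info['levels']})
-- TIER_NAMES = ['Explorer', 'Adventurer', 'Veteran', 'Champion', 'Hero', 'Myth']
--
-- def detect_upgrade_track(item_level):
--     """Detect upgrade track and level from item level"""
--     # binary search for item_level's position in the sorted ladder
--     lo, hi = 0, len(LADDER)
--     while lo < hi:
--         mid = (lo + hi) // 2
--         if LADDER[mid] < item_level:
--             lo = mid + 1
--         else:
--             hi = mid
--     if lo < len(LADDER) and LADDER[lo] == item_level: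
--         start = min(20, lo - lo % 4)
--         return (TIER_NAMES[start // 4], lo - start, 8)
--     if item_level >= 730:
--         return ("Myth", 8, 8)
--     return None
-- ===== Notes on version B (the rewrite author's own statement) =====
-- stated objective: alternative
-- what changed: Replaces the per-track membership-scan-plus-list.index with arithmetic on one sorted global ladder of all distinct levels: a binary search finds the level's ladder position, and the winning track and index are computed in closed form from that position, exploiting that the six tracks are overlapping eight-entry windows starting every fourth ladder position with the earliest-declared track highest.
import Mathlib
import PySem

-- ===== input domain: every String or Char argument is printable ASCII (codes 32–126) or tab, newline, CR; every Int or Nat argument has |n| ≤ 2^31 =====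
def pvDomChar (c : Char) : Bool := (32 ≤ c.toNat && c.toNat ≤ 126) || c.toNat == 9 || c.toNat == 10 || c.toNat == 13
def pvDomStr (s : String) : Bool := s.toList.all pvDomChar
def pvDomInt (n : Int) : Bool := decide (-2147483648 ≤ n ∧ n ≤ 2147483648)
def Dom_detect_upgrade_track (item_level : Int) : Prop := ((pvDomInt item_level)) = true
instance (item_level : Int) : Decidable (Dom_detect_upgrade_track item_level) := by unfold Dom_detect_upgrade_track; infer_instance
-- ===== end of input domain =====

-- B replaces A's per-track membership-scan-plus-.index with a binary search on one
-- sorted global ladder plus closed-form arithmetic on the ladder position; return values only.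

-- ===== PORT A =====
-- str.title, exact for ASCII strings (all track names here are ASCII): an alphabetic
-- character is uppercased after a non-alphabetic position and lowercased otherwise.
def pvAsciiTitle (s : String) : String :=
  String.ofList ((s.toList.foldl
    (fun (acc : List Char × Bool) c =>
      if ('a' ≤ c ∧ c ≤ 'z') ∨ ('A' ≤ c ∧ c ≤ 'Z') then
        (((if acc.2 then
            (if 'A' ≤ c ∧ c ≤ 'Z' then Char.ofNat (c.toNat + 32) else c)
          else
            (if 'a' ≤ c ∧ c ≤ 'z' then Char.ofNat (c.toNat - 32) else c)) :: acc.1), true)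
      else (c :: acc.1, false))
    ([], false)).1.reverse)

-- UPGRADE_TRACKS in insertion order as (name, max_upgrades, levels); the 'base' field
-- is never read by detect_upgrade_track and is omitted.
def pvUpgradeTracks : List (String × Int × List Int) :=
  [ ("myth",       8, [707, 710, 714, 717, 720, 723, 727, 730]),
    ("hero",       8, [694, 697, 701, 704, 707, 710, 714, 717]),
    ("champion",   8, [681, 684, 688, 691, 694, 697, 701, 704]),
    ("veteran",    8, [668, 671, 675, 678, 681, 684, 688, 691]),
    ("adventurer", 8, [655, 658, 661, 665, 668, 671, 675, 678]),
    ("explorer",   8, [643, 646, 649, 652, 655, 658, 661, 665]) ]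

-- the for-loop with early return; .index is guarded by the membership test, so the
-- getD 0 default is never taken (exact).
def pvDetectLoop (item_level : Int) : List (String × Int × List Int) → Option (String × Int × Int)
  | [] => none
  | (name, maxU, levels) :: rest =>
    if item_level ∈ levels then
      some (pvAsciiTitle name, Int.ofNat ((PySem.List.index? levels item_level).getD 0), maxU)
    else pvDetectLoop item_level rest

def detect_upgrade_track (item_level : Int) : Option (String × Int × Int) :=
  match pvDetectLoop item_level pvUpgradeTracks with
  | some r => some r
  | none => if item_level ≥ 730 then some ("Myth", 8, 8) else none

-- ===== PORT B =====
-- LADDER = sorted({lvl for info in UPGRADE_TRACKS.values() for lvl in info['levels']})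
def pvLadder : List Int :=
  PySem.List.sorted (PySem.Set.ofList (pvUpgradeTracks.flatMap (fun t => t.2.2))) (fun x => x) false

def pvTierNames : List String :=
  ["Explorer", "Adventurer", "Veteran", "Champion", "Hero", "Myth"]

-- the while-loop binary search (lo, hi on the ladder); LADDER[mid] is always in range
-- since 0 ≤ lo ≤ mid < hi ≤ len, so the getD 0 default is never taken (exact).
-- fuel = len(LADDER) ≥ hi - lo bounds the iteration count (totality device only).
def pvBinSearch (x : Int) : Nat → Nat → Nat → Nat
  | 0, lo, _ => lo
  | fuel + 1, lo, hi =>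
    if lo < hi then
      let mid := (lo + hi) / 2
      if pvLadder.getD mid 0 < x then pvBinSearch x fuel (mid + 1) hi
      else pvBinSearch x fuel lo mid
    else lo

def detect_upgrade_track_alt (item_level : Int) : Option (String × Int × Int) :=
  let lo := pvBinSearch item_level pvLadder.length 0 pvLadder.length
  if lo < pvLadder.length ∧ pvLadder.getD lo 0 = item_level then
    let start := min 20 (lo - lo % 4)
    some (pvTierNames.getD (start / 4) "", Int.ofNat (lo - start), 8)
  else if item_level ≥ 730 then some ("Myth", 8, 8) else none

-- ===== PRECONDITION & SPEC =====
def Spec_detect_upgrade_track (item_level : Int) (out : Option (String × Int × Int)) : Prop := out = detect_upgrade_track_alt item_level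
instance (item_level : Int) (out : Option (String × Int × Int)) : Decidable (Spec_detect_upgrade_track item_level out) := by unfold Spec_detect_upgrade_track; infer_instance

-- ===== CLAIM (what is proved, stated in full; the proofs are below) =====
def Claim_equal_detect_upgrade_track : Prop := ∀ (item_level : Int), Dom_detect_upgrade_track item_level → Spec_detect_upgrade_track item_level (detect_upgrade_track item_level)

-- ===== LEMMAS AND PROOFS =====

-- the fully evaluated ladder
set_option maxRecDepth 4000 in
lemma pvLadder_eval : pvLadder =
  [643, 646, 649, 652, 655, 658, 661, 665, 668, 671, 675, 678, 681, 684, 688, 691,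
   694, 697, 701, 704, 707, 710, 714, 717, 720, 723, 727, 730] := by
  decide

lemma pvA_out (i : Int) (h : i < 643 ∨ 730 < i) :
    detect_upgrade_track i = if i ≥ 730 then some ("Myth", 8, 8) else none := by
  have : pvDetectLoop i pvUpgradeTracks = none := by
    simp only [pvUpgradeTracks, pvDetectLoop, List.mem_cons, List.not_mem_nil, or_false]
    split_ifs <;> first | omega | rfl
  simp [detect_upgrade_track, this]

-- any ladder entry is at least 643 (and out-of-range getD defaults never arise below 28)
lemma pvLadder_getD_ge (m : Nat) (hm : m < 28) : 643 ≤ pvLadder.getD m 0 := by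
  rw [pvLadder_eval]; interval_cases m <;> decide

lemma pvLadder_getD_le (m : Nat) (hm : m < 28) : pvLadder.getD m 0 ≤ 730 := by
  rw [pvLadder_eval]; interval_cases m <;> decide

-- below 643 every comparison in the search is false, so lo never moves from 0
lemma pvBS_low (i : Int) (h : i ≤ 643) (fuel hi : Nat) (hhi : hi ≤ 28) :
    pvBinSearch i fuel 0 hi = 0 := by
  induction fuel generalizing hi with
  | zero => rfl
  | succ fuel ih =>
    rw [pvBinSearch]
    split
    · have : ¬ pvLadder.getD ((0 + hi) / 2) 0 < i := by
        have := pvLadder_getD_ge ((0 + hi) / 2) (by omega); omega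
      simp only [this, if_false]
      exact ih _ (by omega)
    · rfl

-- above 730 every comparison is true, so lo chases hi up to it
lemma pvBS_high (i : Int) (h : 730 < i) (fuel lo hi : Nat) (hfuel : hi - lo ≤ fuel)
    (hlo : lo ≤ hi) (hhi : hi ≤ 28) : pvBinSearch i fuel lo hi = hi := by
  induction fuel generalizing lo hi with
  | zero => rw [pvBinSearch]; omega
  | succ fuel ih =>
    rw [pvBinSearch]
    split
    · rename_i hlt
      have : pvLadder.getD ((lo + hi) / 2) 0 < i := by
        have := pvLadder_getD_le ((lo + hi) / 2) (by omega); omega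
      simp only [this, if_true]
      exact ih _ _ (by omega) (by omega) hhi
    · omega

lemma pvB_out (i : Int) (h : i < 643 ∨ 730 < i) :
    detect_upgrade_track_alt i = if i ≥ 730 then some ("Myth", 8, 8) else none := by
  unfold detect_upgrade_track_alt
  have hlen : pvLadder.length = 28 := by rw [pvLadder_eval]; rfl
  rcases h with h | h
  · rw [hlen, pvBS_low i (by omega) 28 28 (by omega)]
    have h0 : pvLadder.getD 0 0 = (643 : Int) := by rw [pvLadder_eval]; rfl
    simp only [h0]
    split_ifs <;> first | omega | rfl
  · rw [hlen, pvBS_high i h 28 0 28 (by omega) (by omega) (by omega)]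
    simp only [lt_self_iff_false, false_and, if_false]

-- ===== VERDICT (by name: the statement is the Claim_ definition above) =====
set_option maxHeartbeats 4000000 in
set_option maxRecDepth 8000 in
theorem detect_upgrade_track_spec : Claim_equal_detect_upgrade_track := by
  intro i _
  unfold Spec_detect_upgrade_track
  by_cases h : 643 ≤ i ∧ i ≤ 730
  · obtain ⟨h1, h2⟩ := h
    interval_cases i <;> decide
  · rw [pvA_out i (by omega), pvB_out i (by omega)]
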